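-- pv_equiv track=rewrite | github.com/Afeks214/Lorenzian-Educlidian- | src/security/tls_manager.py | _match_hostname
-- ===== SOURCE A (Python) =====
-- def _match_hostname(pattern: str, hostname: str) -> bool:
--     """Match hostname against pattern (supports wildcards)"""
--     if pattern.startswith("*."):
--         # Wildcard certificate
--         pattern_parts = pattern[2:].split(".")
--         hostname_parts = hostname.split(".")
--
--         if len(hostname_parts) != len(pattern_parts) + 1:
--             return False
--
--         return all(p == h for p, h in zip(pattern_parts, hostname_parts[1:]))
--     else:
--         return pattern == hostname
-- ===== SOURCE B (Python) =====
-- def _match_hostname(pattern: str, hostname: str) -> bool: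
--     """Match hostname against pattern (supports wildcards)"""
--     if pattern.startswith("*."):
--         idx = hostname.find(".")
--         if idx == -1:
--             return False
--         return hostname[idx + 1:] == pattern[2:]
--     else:
--         return pattern == hostname
-- ===== Notes on version B (the rewrite author's own statement) =====
-- stated objective: simpler
-- what changed: The wildcard branch no longer splits both strings into label lists, counts them and zips: it finds the first dot once and compares the remaining suffix with pattern[2:] in a single string comparison.
import Mathlib
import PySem

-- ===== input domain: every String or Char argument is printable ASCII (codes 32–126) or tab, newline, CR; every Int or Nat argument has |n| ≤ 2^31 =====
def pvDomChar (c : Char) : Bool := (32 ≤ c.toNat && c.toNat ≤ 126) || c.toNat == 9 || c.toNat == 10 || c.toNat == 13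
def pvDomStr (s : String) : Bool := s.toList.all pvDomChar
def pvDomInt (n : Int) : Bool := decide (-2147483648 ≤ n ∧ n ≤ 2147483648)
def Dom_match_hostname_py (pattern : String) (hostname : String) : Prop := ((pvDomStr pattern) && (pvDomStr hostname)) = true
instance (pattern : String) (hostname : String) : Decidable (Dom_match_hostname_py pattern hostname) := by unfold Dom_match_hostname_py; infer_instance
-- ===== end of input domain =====

-- B replaces A's split/length-check/zip in the wildcard branch by one suffix comparison after the
-- first dot (simpler decomposition, same cost). Both are total; equivalence is proved on all inputs.

-- ===== PORT A =====
def match_hostname_py (pattern : String) (hostname : String) : Bool :=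
  if PySem.Str.startswith pattern "*." then
    let patternParts := PySem.Chars.splitOn (PySem.Chars.slice pattern.toList (some 2) none) ['.']
    let hostnameParts := PySem.Chars.splitOn hostname.toList ['.']
    if hostnameParts.length ≠ patternParts.length + 1 then false
    else (patternParts.zip (PySem.List.slice hostnameParts (some 1) none)).all (fun ph => ph.1 == ph.2)
  else pattern == hostname

-- ===== PORT B =====
def match_hostname_py_alt (pattern : String) (hostname : String) : Bool :=
  if PySem.Str.startswith pattern "*." then
    let idx := PySem.Chars.find hostname.toList ['.']
    if idx = -1 then false
    else PySem.Chars.slice hostname.toList (some (idx + 1)) none == PySem.Chars.slice pattern.toList (some 2) none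
  else pattern == hostname

-- ===== PRECONDITION & SPEC =====
def Spec_match_hostname_py (pattern : String) (hostname : String) (out : Bool) : Prop := out = match_hostname_py_alt pattern hostname
instance (pattern : String) (hostname : String) (out : Bool) : Decidable (Spec_match_hostname_py pattern hostname out) := by unfold Spec_match_hostname_py; infer_instance

-- ===== CLAIM (what is proved, stated in full; the proofs are below) =====
def Claim_equal_match_hostname_py : Prop := ∀ (pattern : String) (hostname : String), Dom_match_hostname_py pattern hostname → Spec_match_hostname_py pattern hostname (match_hostname_py pattern hostname)

-- ===== LEMMAS AND PROOFS =====

-- A structural model of s.split(".") (single-character separator).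
def mySplit : List Char → List (List Char)
  | [] => [[]]
  | c :: rest =>
    if c = '.' then [] :: mySplit rest
    else
      match mySplit rest with
      | [] => [[c]]
      | p :: ps => (c :: p) :: ps

lemma mySplit_ne_nil (l : List Char) : mySplit l ≠ [] := by
  cases l with
  | nil => simp [mySplit]
  | cons c rest =>
    simp only [mySplit]
    split <;> try simp
    split <;> simp

lemma splitOn_go_eq (fuel : Nat) :
    ∀ (l cur : List Char) (acc : List (List Char)), l.length < fuel →
    PySem.Chars.splitOn.go ['.'] fuel l cur acc =
      acc.reverse ++ ((cur.reverse ++ (mySplit l).headI) :: (mySplit l).tail) := by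
  induction fuel with
  | zero => intro l cur acc h; omega
  | succ fuel ih =>
    intro l cur acc h
    cases l with
    | nil => simp [PySem.Chars.splitOn.go, mySplit]
    | cons c rest =>
      by_cases hc : c = '.'
      · subst hc
        rw [show PySem.Chars.splitOn.go ['.'] (fuel+1) ('.' :: rest) cur acc
              = PySem.Chars.splitOn.go ['.'] fuel (List.drop 1 ('.' :: rest)) [] (cur.reverse :: acc) from by
              simp [PySem.Chars.splitOn.go]]
        rw [ih _ _ _ (by simpa using Nat.lt_of_succ_lt_succ h)]
        cases hms : mySplit rest with
        | nil => exact absurd hms (mySplit_ne_nil rest)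
        | cons p ps => simp [mySplit, hms]
      · rw [show PySem.Chars.splitOn.go ['.'] (fuel+1) (c :: rest) cur acc
              = PySem.Chars.splitOn.go ['.'] fuel rest (c :: cur) acc from by
              simp [PySem.Chars.splitOn.go, List.isPrefixOf]
              exact fun hh => absurd hh.symm hc]
        rw [ih _ _ _ (by simpa using Nat.lt_of_succ_lt_succ h)]
        simp only [mySplit, if_neg hc]
        cases hms : mySplit rest with
        | nil => exact absurd hms (mySplit_ne_nil rest)
        | cons p ps => simp

lemma splitOn_eq_mySplit (l : List Char) : PySem.Chars.splitOn l ['.'] = mySplit l := by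
  rw [PySem.Chars.splitOn, splitOn_go_eq (l.length + 1) l [] [] (by omega)]
  cases hms : mySplit l with
  | nil => exact absurd hms (mySplit_ne_nil l)
  | cons p ps => simp

def myJoin : List (List Char) → List Char
  | [] => []
  | [p] => p
  | p :: ps => p ++ '.' :: myJoin ps

lemma myJoin_mySplit (l : List Char) : myJoin (mySplit l) = l := by
  induction l with
  | nil => simp [mySplit, myJoin]
  | cons c rest ih =>
    by_cases hc : c = '.'
    · subst hc
      simp only [mySplit, if_pos]
      cases hms : mySplit rest with
      | nil => exact absurd hms (mySplit_ne_nil rest)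
      | cons p ps =>
        rw [hms] at ih
        simp [myJoin, ih]
    · simp only [mySplit, if_neg hc]
      cases hms : mySplit rest with
      | nil => exact absurd hms (mySplit_ne_nil rest)
      | cons p ps =>
        rw [hms] at ih
        cases ps with
        | nil => simpa [myJoin] using congrArg (c :: ·) ih
        | cons q qs => simpa [myJoin] using congrArg (c :: ·) ih

lemma mySplit_injective {a b : List Char} (h : mySplit a = mySplit b) : a = b := by
  have := congrArg myJoin h
  rwa [myJoin_mySplit, myJoin_mySplit] at this

lemma mySplit_no_dot {l : List Char} (h : '.' ∉ l) : mySplit l = [l] := by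
  induction l with
  | nil => simp [mySplit]
  | cons c rest ih =>
    simp only [List.mem_cons, not_or] at h
    have hc : ¬ c = '.' := fun hh => h.1 hh.symm
    simp [mySplit, hc, ih h.2]

lemma mySplit_first_dot : ∀ (k : Nat) (l : List Char),
    (∀ i, i < k → l.drop i ≠ [] → ¬ ('.' :: []) <+: l.drop i) → ('.' :: []) <+: l.drop k →
    mySplit l = l.take k :: mySplit (l.drop (k + 1)) := by
  intro k
  induction k with
  | zero =>
    intro l _ hk
    cases l with
    | nil => simp at hk
    | cons c rest =>
      simp only [List.drop_zero] at hk
      obtain ⟨t, ht⟩ := hk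
      cases ht
      simp [mySplit]
  | succ k ih =>
    intro l hmin hk
    cases l with
    | nil => simp at hk
    | cons c rest =>
      have hc : c ≠ '.' := by
        intro hc; subst hc
        exact hmin 0 (by omega) (by simp) (by simp)
      have := ih rest (fun i hi hne hpre => hmin (i+1) (by omega) (by simpa using hne) (by simpa using hpre))
        (by simpa using hk)
      simp only [mySplit, if_neg hc, this]
      cases hms : mySplit (rest.drop (k + 1)) with
      | nil => exact absurd hms (mySplit_ne_nil _)
      | cons p ps => simp [hms]

lemma list_eq_iff_len_zip_all (xs ys : List (List Char)) :
    (xs = ys) ↔ xs.length = ys.length ∧ (xs.zip ys).all (fun ph => ph.1 == ph.2) := by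
  induction xs generalizing ys with
  | nil => cases ys <;> simp
  | cons x xt ih =>
    cases ys with
    | nil => simp
    | cons y yt =>
      simp only [List.zip_cons_cons, List.all_cons, List.length_cons, List.cons.injEq]
      rw [ih yt]
      constructor
      · rintro ⟨h1, h2, h3⟩; simp [h1, h2, h3]
      · rintro ⟨h1, h2⟩
        simp only [Bool.and_eq_true, beq_iff_eq] at h2
        exact ⟨h2.1, by omega, h2.2⟩

lemma wildcard_branch_eq (pp hh : List Char) :
    (if (PySem.Chars.splitOn hh ['.']).length ≠ (PySem.Chars.splitOn (PySem.Chars.slice pp (some 2) none) ['.']).length + 1 then false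
     else ((PySem.Chars.splitOn (PySem.Chars.slice pp (some 2) none) ['.']).zip
            (PySem.List.slice (PySem.Chars.splitOn hh ['.']) (some 1) none)).all (fun ph => ph.1 == ph.2))
    = (if PySem.Chars.find hh ['.'] = -1 then false
       else PySem.Chars.slice hh (some (PySem.Chars.find hh ['.'] + 1)) none == PySem.Chars.slice pp (some 2) none) := by
  have h2 : PySem.Chars.slice pp (some 2) none = pp.drop 2 := by
    simp [PySem.List.slice_from pp (by norm_num : (0:Int) ≤ 2)]
  rw [h2, splitOn_eq_mySplit, splitOn_eq_mySplit]
  rw [show PySem.List.slice (mySplit hh) (some 1) none = (mySplit hh).tail from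
    PySem.List.slice_from_one (mySplit hh)]
  by_cases hdot : PySem.Chars.find hh ['.'] = -1
  · rw [if_pos hdot]
    have hnin : '.' ∉ hh := by
      intro hmem
      obtain ⟨s, t, rfl⟩ := List.append_of_mem hmem
      exact (PySem.Chars.find_eq_neg_one_iff _ _).mp hdot ⟨s, t, by simp⟩
    rw [mySplit_no_dot hnin]
    have hne := mySplit_ne_nil (pp.drop 2)
    rw [if_pos (by
      cases hms : mySplit (pp.drop 2) with
      | nil => exact absurd hms hne
      | cons p ps => simp)]
  · rw [if_neg hdot]
    have hge : 0 ≤ PySem.Chars.find hh ['.'] := by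
      have := PySem.Chars.neg_one_le_find hh ['.']
      omega
    obtain ⟨hpre, hmin⟩ := PySem.Chars.find_spec hge
    have hsplit := mySplit_first_dot (PySem.Chars.find hh ['.']).toNat hh
      (fun i hi _ hp => hmin i hi hp) hpre
    have hslice : PySem.Chars.slice hh (some (PySem.Chars.find hh ['.'] + 1)) none
        = hh.drop ((PySem.Chars.find hh ['.']).toNat + 1) := by
      rw [show PySem.Chars.slice hh (some (PySem.Chars.find hh ['.'] + 1)) none
            = PySem.List.slice hh (some (PySem.Chars.find hh ['.'] + 1)) none from rfl,
          PySem.List.slice_from hh (by omega)]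
      congr 1
      omega
    rw [hsplit, hslice]
    set k := (PySem.Chars.find hh ['.']).toNat
    by_cases heq : hh.drop (k + 1) = pp.drop 2
    · have hT := (list_eq_iff_len_zip_all (mySplit (pp.drop 2)) (mySplit (hh.drop (k + 1)))).mp
        (by rw [heq])
      rw [if_neg (by simp [hT.1])]
      simp only [List.tail_cons]
      rw [hT.2, heq]
      simp
    · have hT : mySplit (pp.drop 2) ≠ mySplit (hh.drop (k + 1)) :=
        fun h => heq (mySplit_injective h).symm
      have hrhs : (hh.drop (k + 1) == pp.drop 2) = false := by
        simpa using heq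
      rw [hrhs]
      by_cases hlen : (mySplit (hh.drop (k + 1))).length = (mySplit (pp.drop 2)).length
      · rw [if_neg (by simp [hlen])]
        simp only [List.tail_cons]
        cases hall : ((mySplit (pp.drop 2)).zip (mySplit (hh.drop (k + 1)))).all
            (fun ph => ph.1 == ph.2) with
        | false => rfl
        | true => exact absurd ((list_eq_iff_len_zip_all _ _).mpr ⟨hlen.symm, hall⟩) hT
      · rw [if_pos (by simp; omega)]

-- ===== VERDICT (by name: the statement is the Claim_ definition above) =====
theorem match_hostname_py_spec : Claim_equal_match_hostname_py := by
  intro pattern hostname _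
  unfold Spec_match_hostname_py match_hostname_py match_hostname_py_alt
  rw [wildcard_branch_eq pattern.toList hostname.toList]
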